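-- pv_equiv track=rewrite | github.com/cphoe-598/rosalind | splc/splc.py | transcribe_spliced
-- ===== SOURCE A (Python) =====
-- def transcribe_spliced(gene: str, introns: list[str]) -> str:
--     """ DNA -> RNA, introns spliced out """
--
--     # find ranges of introns in gene
--     intron_starts = dict(zip(introns, [gene.find(intron) for intron in introns]))
--     intron_ranges = [range(s, s + len(i)) for i, s in intron_starts.items()]
--
--     # exclude ranges from gene
--     r = set(range(len(gene)))  # set of all indices in gene
--     for rng in intron_ranges:
--         r -= set(rng)
--
--     spliced_rna = "".join(exon for i, exon in enumerate(gene) if i in r)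
--
--     return spliced_rna
-- ===== SOURCE B (Python) =====
-- def transcribe_spliced(gene: str, introns: list[str]) -> str:
--     """ DNA -> RNA, introns spliced out (interval cursor walk instead of an index set) """
--     intervals = sorted(((gene.find(i), gene.find(i) + len(i)) for i in introns),
--                        key=lambda iv: iv[0])
--     out = []
--     cur = 0
--     for s, e in intervals:
--         if cur < s:
--             out.append(gene[cur:s])
--         if cur < e:
--             cur = e
--     return "".join(out) + gene[cur:]
-- ===== Notes on version B (the rewrite author's own statement) =====
-- stated objective: alternative
-- what changed: Instead of building set(range(len(gene))) and subtracting a set of indices per intron and then filtering every character by set membership, B sorts the (find, find+len) intervals by start and walks a single cursor through the gene, concatenating the kept slices between intervals.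
import Mathlib
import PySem

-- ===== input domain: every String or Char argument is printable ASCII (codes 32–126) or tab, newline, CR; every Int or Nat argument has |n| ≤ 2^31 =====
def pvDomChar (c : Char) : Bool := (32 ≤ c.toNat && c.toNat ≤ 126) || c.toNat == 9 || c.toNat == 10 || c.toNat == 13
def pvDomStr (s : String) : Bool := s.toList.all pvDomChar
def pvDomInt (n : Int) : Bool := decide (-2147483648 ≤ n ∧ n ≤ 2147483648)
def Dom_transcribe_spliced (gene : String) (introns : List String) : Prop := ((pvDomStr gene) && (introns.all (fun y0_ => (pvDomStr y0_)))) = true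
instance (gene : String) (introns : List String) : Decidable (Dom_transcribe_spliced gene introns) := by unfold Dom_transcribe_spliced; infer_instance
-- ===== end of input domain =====

-- B replaces A's index-set construction (set(range(len)) minus a set per intron) by sorting the
-- found intervals and walking a cursor once through the gene, concatenating the kept slices.


-- ===== PORT A =====
def transcribe_spliced (gene : String) (introns : List String) : String :=
  let g := gene.toList
  let intron_starts : PySem.Dict String Int :=
    PySem.Dict.ofList (introns.zip (introns.map (fun i => PySem.Str.find gene i)))
  let intron_ranges :=
    intron_starts.items.map (fun p => PySem.List.pyRange p.2 (p.2 + PySem.Str.len p.1) 1)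
  let r : PySem.Set Int :=
    intron_ranges.foldl (fun r rng => PySem.Set.diff r (PySem.Set.ofList rng))
      (PySem.Set.ofList (PySem.List.pyRange 0 (PySem.Str.len gene) 1))
  String.ofList (((PySem.List.enumerate g 0).filter (fun p => PySem.Set.contains r p.1)).map (·.2))

-- ===== PORT B =====
-- one loop iteration: if cur < s append gene[cur:s]; if cur < e move the cursor to e
def spliceStep (g : List Char) (st : List Char × Int) (iv : Int × Int) : List Char × Int :=
  let st1 := if st.2 < iv.1 then (st.1 ++ PySem.List.slice g (some st.2) (some iv.1), st.2) else st
  if st1.2 < iv.2 then (st1.1, iv.2) else st1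

def transcribe_spliced_alt (gene : String) (introns : List String) : String :=
  let g := gene.toList
  let intervals :=
    PySem.List.sorted (introns.map (fun i => (PySem.Str.find gene i, PySem.Str.find gene i + PySem.Str.len i)))
      (fun iv => iv.1) false
  let r := intervals.foldl (spliceStep g) ([], 0)
  String.ofList (r.1 ++ PySem.List.slice g (some r.2) none)

-- ===== PRECONDITION & SPEC =====
def Spec_transcribe_spliced (gene : String) (introns : List String) (out : String) : Prop := out = transcribe_spliced_alt gene introns
instance (gene : String) (introns : List String) (out : String) : Decidable (Spec_transcribe_spliced gene introns out) := by unfold Spec_transcribe_spliced; infer_instance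

-- ===== CLAIM (what is proved, stated in full; the proofs are below) =====
def Claim_equal_transcribe_spliced : Prop := ∀ (gene : String) (introns : List String), Dom_transcribe_spliced gene introns → Spec_transcribe_spliced gene introns (transcribe_spliced gene introns)

-- ===== LEMMAS AND PROOFS =====

-- k is covered by some interval of ivs
def covB (ivs : List (Int × Int)) (k : Int) : Bool :=
  ivs.any (fun iv => decide (iv.1 ≤ k) && decide (k < iv.2))

-- the characters of g whose index is ≥ cur and not covered by ivs, in order
def keep (g : List Char) (ivs : List (Int × Int)) (cur : Int) : List Char :=
  ((PySem.List.enumerate g 0).filter (fun p => decide (cur ≤ p.1) && !covB ivs p.1)).map (·.2)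

-- the intervals (find, find+len) computed from the introns
def ivs0 (gene : String) (introns : List String) : List (Int × Int) :=
  introns.map (fun i => (PySem.Str.find gene i, PySem.Str.find gene i + PySem.Str.len i))

lemma filter_enum_between (g : List Char) : ∀ (a lo hi : Int),
    (((PySem.List.enumerate g a).filter (fun p => decide (lo ≤ p.1) && decide (p.1 < hi))).map (·.2))
      = (g.drop (lo - a).toNat).take ((hi - a).toNat - (lo - a).toNat) := by
  induction g with
  | nil => intro a lo hi; simp [PySem.List.enumerate_nil]
  | cons c t ih =>
    intro a lo hi
    rw [PySem.List.enumerate_cons]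
    by_cases h1 : lo ≤ a
    · by_cases h2 : a < hi
      · have hd : (lo - a).toNat = 0 := by omega
        have hd' : (lo - (a+1)).toNat = 0 := by omega
        have hs : (hi - a).toNat - (lo - a).toNat = ((hi - (a+1)).toNat - (lo - (a+1)).toNat) + 1 := by omega
        simp only [List.filter_cons]
        rw [if_pos (by simp [h1, h2])]
        simp only [List.map_cons, ih (a+1), hd, List.drop_zero, hd']
        have hs2 : (hi - a).toNat - 0 = ((hi - (a+1)).toNat - 0) + 1 := by omega
        rw [hs2, List.take_succ_cons]
      · have hz : (hi - a).toNat - (lo - a).toNat = 0 := by omega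
        have hz' : (hi - (a+1)).toNat - (lo - (a+1)).toNat = 0 := by omega
        simp only [List.filter_cons]
        rw [if_neg (by simp [h2])]
        simp only [ih (a+1), hz, hz', List.take_zero]
    · simp only [List.filter_cons]
      rw [if_neg (by simp [h1])]
      rw [ih (a+1)]
      have hdrop : (lo - a).toNat = (lo - (a+1)).toNat + 1 := by omega
      have htake : (hi - a).toNat - ((lo - (a+1)).toNat + 1) = (hi - (a+1)).toNat - (lo - (a+1)).toNat := by omega
      rw [hdrop, htake, List.drop_succ_cons]

lemma filter_enum_from (g : List Char) (lo : Int) (h0 : 0 ≤ lo) :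
    (((PySem.List.enumerate g 0).filter (fun p => decide (lo ≤ p.1))).map (·.2)) = g.drop lo.toNat := by
  have hc : ((PySem.List.enumerate g 0).filter (fun p => decide (lo ≤ p.1)))
      = ((PySem.List.enumerate g 0).filter (fun p => decide (lo ≤ p.1) && decide (p.1 < (g.length : Int)))) := by
    apply List.filter_congr
    intro p hp
    rcases (PySem.List.mem_enumerate_iff g 0 p).1 hp with ⟨k, hk, rfl⟩
    simp
    omega
  rw [hc, filter_enum_between g 0 lo (g.length : Int)]
  have h1 : ((g.length : Int) - 0).toNat = g.length := by omega
  have h2 : (lo - 0).toNat = lo.toNat := by omega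
  rw [h1, h2]
  apply List.take_of_length_le
  simp

lemma filter_ord_split {α : Type} (P1 P2 : Int → Bool)
    (hlt : ∀ i j, P1 i = true → P2 j = true → i < j) :
    ∀ (l : List (Int × α)), l.Pairwise (fun p q => p.1 < q.1) →
    l.filter (fun p => P1 p.1 || P2 p.1) = l.filter (fun p => P1 p.1) ++ l.filter (fun p => P2 p.1) := by
  intro l
  induction l with
  | nil => intro _; simp
  | cons x t ih =>
    intro hp
    rcases List.pairwise_cons.1 hp with ⟨hx, ht⟩
    by_cases h1 : P1 x.1 = true
    · have h2 : P2 x.1 = false := by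
        by_contra h
        have := hlt x.1 x.1 h1 (by simpa using h)
        omega
      simp only [List.filter_cons, h1, h2, Bool.true_or, ih ht]
      simp
    · by_cases h2 : P2 x.1 = true
      · have hempty : t.filter (fun p => P1 p.1) = [] := by
          rw [List.filter_eq_nil_iff]
          intro q hq
          simp only [Bool.not_eq_true]
          by_contra h
          have hq1 : P1 q.1 = true := by simpa using h
          have := hlt q.1 x.1 hq1 h2
          have := hx q hq
          omega
        simp only [List.filter_cons, h2]
        simp only [Bool.not_eq_true] at h1
        simp only [h1, Bool.false_or, ih ht, hempty]
        simp
      · simp only [Bool.not_eq_true] at h1 h2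
        simp only [List.filter_cons, h1, h2, Bool.false_or, Bool.false_eq_true, if_false, ih ht]

lemma mem_foldl_diff : ∀ (rngs : List (List Int)) (r : PySem.Set Int) (k : Int),
    k ∈ rngs.foldl (fun r rng => PySem.Set.diff r (PySem.Set.ofList rng)) r ↔
      k ∈ r ∧ ∀ rng ∈ rngs, k ∉ rng := by
  intro rngs
  induction rngs with
  | nil => intro r k; simp
  | cons rng t ih =>
    intro r k
    simp only [List.foldl_cons, ih, PySem.Set.mem_diff, PySem.Set.mem_ofList, List.mem_cons]
    constructor
    · rintro ⟨⟨hr, hn⟩, ht⟩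
      refine ⟨hr, fun x hx => ?_⟩
      rcases hx with rfl | hx
      · exact hn
      · exact ht x hx
    · rintro ⟨hr, hall⟩
      exact ⟨⟨hr, hall rng (Or.inl rfl)⟩, fun x hx => hall x (Or.inr hx)⟩

lemma items_ofList_graph {κ ν : Type} [BEq κ] [LawfulBEq κ] (f : κ → ν) : ∀ (xs : List κ),
    (PySem.Dict.ofList (xs.map (fun x => (x, f x)))).items = (PySem.List.dedup xs).map (fun x => (x, f x)) := by
  intro xs
  induction xs using List.reverseRecOn with
  | nil => rfl
  | append_singleton t x ih =>
    have h1 : PySem.Dict.ofList ((t ++ [x]).map (fun x => (x, f x)))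
        = (PySem.Dict.ofList (t.map (fun x => (x, f x)))).insert x (f x) := by
      simp [PySem.Dict.ofList, PySem.Dict.update, List.foldl_append]
    rw [h1]
    set d := PySem.Dict.ofList (t.map (fun x => (x, f x))) with hd
    rw [PySem.Dict.items_insert]
    by_cases hc : d.contains x = true
    · rw [if_pos hc]
      have hmem : x ∈ PySem.List.dedup t := by
        have := (PySem.Dict.contains_iff_mem_keys d x).1 hc
        have hk : d.keys = PySem.List.dedup t := by
          simp only [PySem.Dict.keys, ih, List.map_map]
          simp [Function.comp_def]
        simpa [hk] using this
      have hded : PySem.List.dedup (t ++ [x]) = PySem.List.dedup t := by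
        simp only [PySem.List.dedup_eq_ofList, PySem.Set.ofList_append_singleton]
        exact PySem.Set.add_of_mem (by simpa [PySem.Set.mem_ofList] using hmem)
      rw [hded, ih]
      rw [List.map_map]
      apply List.map_congr_left
      intro y hy
      by_cases hxy : y = x
      · subst hxy; simp
      · simp [Function.comp, hxy, beq_iff_eq]
    · rw [if_neg hc]
      have hmem : x ∉ PySem.List.dedup t := by
        intro hm
        apply hc
        rw [PySem.Dict.contains_iff_mem_keys]
        have hk : d.keys = PySem.List.dedup t := by
          simp only [PySem.Dict.keys, ih, List.map_map]
          simp [Function.comp_def]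
        rw [hk]
        exact hm
      have hded : PySem.List.dedup (t ++ [x]) = PySem.List.dedup t ++ [x] := by
        simp only [PySem.List.dedup_eq_ofList, PySem.Set.ofList_append_singleton]
        exact PySem.Set.add_of_not_mem (by simpa [PySem.Set.mem_ofList] using hmem)
      rw [hded, ih, List.map_append]
      rfl

lemma keep_nil (g : List Char) (cur : Int) (h0 : 0 ≤ cur) :
    keep g [] cur = g.drop cur.toNat := by
  unfold keep
  rw [← filter_enum_from g cur h0]
  congr 1
  apply List.filter_congr
  intro p _
  simp [covB]

lemma keep_cons_lt (g : List Char) (s e cur : Int) (rest : List (Int × Int))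
    (hcs : cur < s) (hse : s ≤ e) (hrest : ∀ iv ∈ rest, s ≤ iv.1) (h0 : 0 ≤ cur) :
    keep g ((s, e) :: rest) cur = PySem.List.slice g (some cur) (some s) ++ keep g rest e := by
  unfold keep
  have hcong : ((PySem.List.enumerate g 0).filter (fun p => decide (cur ≤ p.1) && !covB ((s,e)::rest) p.1))
      = ((PySem.List.enumerate g 0).filter (fun p =>
          (decide (cur ≤ p.1) && decide (p.1 < s)) || (decide (e ≤ p.1) && !covB rest p.1))) := by
    apply List.filter_congr
    intro p _
    set k := p.1 with hk
    simp only [covB, List.any_cons]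
    by_cases hks : k < s
    · have hcov : rest.any (fun iv => decide (iv.1 ≤ k) && decide (k < iv.2)) = false := by
        rw [List.any_eq_false]
        intro iv hiv
        have := hrest iv hiv
        simp only [Bool.and_eq_true, decide_eq_true_eq, not_and]
        intro h; omega
      have h1 : ¬ s ≤ k := by omega
      have h2 : ¬ e ≤ k := by omega
      simp [hcov, h1, h2, hks]
    · have h1 : s ≤ k := by omega
      have h2 : cur ≤ k := by omega
      by_cases hke : k < e
      · have h3 : ¬ e ≤ k := by omega
        simp [h1, h2, h3, hke, hks]
      · have h3 : e ≤ k := by omega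
        simp [h1, h2, h3, hke, hks]
  rw [hcong]
  rw [filter_ord_split (fun k => decide (cur ≤ k) && decide (k < s))
        (fun k => decide (e ≤ k) && !covB rest k)
        (by intro i j hi hj; simp only [Bool.and_eq_true, decide_eq_true_eq] at hi hj; omega)
        _ (PySem.List.pairwise_lt_enumerate g 0)]
  rw [List.map_append]
  congr 1
  rw [filter_enum_between g 0 cur s]
  rw [PySem.List.slice_toNat g h0 (by omega)]
  have e1 : (cur - 0).toNat = cur.toNat := by omega
  have e2 : (s - 0).toNat = s.toNat := by omega
  rw [e1, e2]

lemma keep_cons_mid (g : List Char) (s e cur : Int) (rest : List (Int × Int))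
    (hcs : s ≤ cur) (hce : cur < e) :
    keep g ((s, e) :: rest) cur = keep g rest e := by
  unfold keep
  congr 1
  apply List.filter_congr
  intro p _
  simp only [covB, List.any_cons]
  by_cases hck : cur ≤ p.1
  · have h1 : s ≤ p.1 := by omega
    by_cases hke : p.1 < e
    · have h2 : ¬ e ≤ p.1 := by omega
      simp [h1, h2, hck, hke]
    · have h2 : e ≤ p.1 := by omega
      simp [h1, h2, hck, hke]
  · have h2 : ¬ e ≤ p.1 := by omega
    simp [hck, h2]

lemma keep_cons_past (g : List Char) (s e cur : Int) (rest : List (Int × Int))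
    (_hcs : s ≤ cur) (hce : e ≤ cur) :
    keep g ((s, e) :: rest) cur = keep g rest cur := by
  unfold keep
  congr 1
  apply List.filter_congr
  intro p _
  simp only [covB, List.any_cons]
  by_cases hck : cur ≤ p.1
  · have h1 : ¬ p.1 < e := by omega
    simp [h1, hck]
  · simp [hck]

lemma walk (g : List Char) : ∀ (ivs : List (Int × Int)) (acc : List Char) (cur : Int),
    0 ≤ cur → ivs.Pairwise (fun a b => a.1 ≤ b.1) → (∀ iv ∈ ivs, iv.1 ≤ iv.2) →
    (ivs.foldl (spliceStep g) (acc, cur)).1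
        ++ PySem.List.slice g (some (ivs.foldl (spliceStep g) (acc, cur)).2) none
      = acc ++ keep g ivs cur := by
  intro ivs
  induction ivs with
  | nil =>
    intro acc cur h0 _ _
    simp only [List.foldl_nil]
    rw [PySem.List.slice_from g h0, keep_nil g cur h0]
  | cons iv rest ih =>
    intro acc cur h0 hpw hb
    obtain ⟨s, e⟩ := iv
    rcases List.pairwise_cons.1 hpw with ⟨hrest, hpw'⟩
    have hse : s ≤ e := hb (s, e) (List.mem_cons_self)
    have hb' : ∀ iv ∈ rest, iv.1 ≤ iv.2 := fun iv h => hb iv (List.mem_cons_of_mem _ h)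
    simp only [List.foldl_cons]
    by_cases hcs : cur < s
    · have hstep : spliceStep g (acc, cur) (s, e)
          = (acc ++ PySem.List.slice g (some cur) (some s), e) := by
        simp [spliceStep, hcs, show cur < e by omega]
      rw [hstep, ih _ e (by omega) hpw' hb',
          keep_cons_lt g s e cur rest hcs hse (fun iv h => hrest iv h) h0, List.append_assoc]
    · by_cases hce : cur < e
      · have hstep : spliceStep g (acc, cur) (s, e) = (acc, e) := by
          simp [spliceStep, hcs, hce]
        rw [hstep, ih _ e (by omega) hpw' hb', keep_cons_mid g s e cur rest (by omega) hce]
      · have hstep : spliceStep g (acc, cur) (s, e) = (acc, cur) := by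
          simp [spliceStep, hcs, hce]
        rw [hstep, ih _ cur h0 hpw' hb', keep_cons_past g s e cur rest (by omega) (by omega)]

lemma covB_perm (ivs ivs' : List (Int × Int)) (hp : ivs.Perm ivs') (k : Int) :
    covB ivs k = covB ivs' k := by
  unfold covB
  exact hp.any_eq

lemma alt_eq_keep (gene : String) (introns : List String) :
    transcribe_spliced_alt gene introns = String.ofList (keep gene.toList (ivs0 gene introns) 0) := by
  simp only [transcribe_spliced_alt, ivs0]
  have hpw := PySem.List.sorted_pairwise (ivs0 gene introns) (fun iv => iv.1)
  simp only [ivs0] at hpw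
  have hb : ∀ iv ∈ PySem.List.sorted (ivs0 gene introns) (fun iv => iv.1) false, iv.1 ≤ iv.2 := by
    intro iv hiv
    rw [PySem.List.mem_sorted] at hiv
    rcases List.mem_map.1 hiv with ⟨i, _, rfl⟩
    simp only [PySem.Str.len]
    omega
  have hw := walk gene.toList (PySem.List.sorted (ivs0 gene introns) (fun iv => iv.1) false)
      [] 0 le_rfl (by simpa [ivs0] using hpw) hb
  simp only [ivs0] at hw
  rw [hw]
  simp only [List.nil_append]
  congr 1
  unfold keep
  congr 1
  apply List.filter_congr
  intro p _
  have hcp := covB_perm _ (ivs0 gene introns) (PySem.List.sorted_perm (ivs0 gene introns) (fun iv => iv.1) false) p.1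
  simp only [ivs0] at hcp
  rw [hcp]

lemma a_eq_keep (gene : String) (introns : List String) :
    transcribe_spliced gene introns = String.ofList (keep gene.toList (ivs0 gene introns) 0) := by
  simp only [transcribe_spliced, keep]
  congr 1
  congr 1
  apply List.filter_congr
  intro p hp
  rcases (PySem.List.mem_enumerate_iff _ 0 p).1 hp with ⟨k, hk, rfl⟩
  simp only [zero_add]
  have hzip : introns.zip (introns.map (fun i => PySem.Str.find gene i))
      = introns.map (fun i => (i, PySem.Str.find gene i)) := by
    have h := @List.zip_map' String String Int id (fun i => PySem.Str.find gene i) introns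
    simpa using h
  rw [Bool.eq_iff_iff, PySem.Set.contains_iff]
  rw [mem_foldl_diff, PySem.Set.mem_ofList, PySem.List.mem_pyRange_one]
  rw [hzip, items_ofList_graph (fun i => PySem.Str.find gene i) introns]
  constructor
  · rintro ⟨⟨h0, hn⟩, hall⟩
    simp only [Bool.and_eq_true, decide_eq_true_eq, Bool.not_eq_true']
    refine ⟨h0, ?_⟩
    rw [covB, List.any_eq_false]
    intro iv hiv
    rcases List.mem_map.1 hiv with ⟨i, hi, rfl⟩
    have hd : i ∈ PySem.List.dedup introns := by
      rw [PySem.List.mem_dedup]; exact hi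
    have := hall (PySem.List.pyRange (PySem.Str.find gene i) (PySem.Str.find gene i + PySem.Str.len i) 1)
      (List.mem_map.2 ⟨(i, PySem.Str.find gene i), List.mem_map.2 ⟨i, hd, rfl⟩, rfl⟩)
    simp only [Bool.and_eq_true, decide_eq_true_eq, not_and]
    intro hle hlt
    exact this (PySem.List.mem_pyRange_one.2 ⟨hle, hlt⟩)
  · intro h
    simp only [Bool.and_eq_true, decide_eq_true_eq, Bool.not_eq_true'] at h
    rcases h with ⟨h0, hcov⟩
    refine ⟨⟨h0, by simp only [PySem.Str.len]; exact_mod_cast hk⟩, ?_⟩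
    intro rng hrng
    rcases List.mem_map.1 hrng with ⟨q, hq, rfl⟩
    rcases List.mem_map.1 hq with ⟨i, hi, rfl⟩
    intro hmem
    rcases PySem.List.mem_pyRange_one.1 hmem with ⟨hle, hlt⟩
    rw [covB, List.any_eq_false] at hcov
    have := hcov (PySem.Str.find gene i, PySem.Str.find gene i + PySem.Str.len i)
      (List.mem_map.2 ⟨i, (PySem.List.mem_dedup _ _ ).1 hi, rfl⟩)
    simp only [Bool.and_eq_true, decide_eq_true_eq, not_and] at this
    exact this hle hlt


-- ===== VERDICT (by name: the statement is the Claim_ definition above) =====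
theorem transcribe_spliced_spec : Claim_equal_transcribe_spliced := by
  intro gene introns _
  unfold Spec_transcribe_spliced
  rw [a_eq_keep, alt_eq_keep]
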